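-- pv_equiv track=rewrite | github.com/MichaelDamsgaard/AnalyzeBugger | mcp-server/crypto_analyzer.py | _diff_strings
-- ===== SOURCE A (Python) =====
-- from typing import Optional, List, Dict, Any, Tuple, Set
--
-- def _diff_strings(s1: str, s2: str) -> List[int]:
--     """Find positions where two strings differ."""
--     diffs = []
--     for i in range(min(len(s1), len(s2))):
--         if s1[i] != s2[i]:
--             diffs.append(i)
--     # Length difference
--     if len(s1) != len(s2):
--         for i in range(min(len(s1), len(s2)), max(len(s1), len(s2))):
--             diffs.append(i)
--     return diffs
-- ===== SOURCE B (Python) =====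
-- from typing import List
--
-- def _diff_strings(s1: str, s2: str) -> List[int]:
--     """Find positions where two strings differ.
--
--     Complement approach: record the set of positions where the strings AGREE
--     (only possible inside the overlap), then report every position of the
--     longer string that is not in that set."""
--     same = {i for i, (a, b) in enumerate(zip(s1, s2)) if a == b}
--     return [i for i in range(max(len(s1), len(s2))) if i not in same]
-- ===== Notes on version B (the rewrite author's own statement) =====
-- stated objective: alternative
-- what changed: Instead of scanning positions and collecting mismatches (A's comparison loop plus a separate length-difference loop), B builds the set of positions where the strings AGREE and returns the complement of that set within range(max(len(s1), len(s2))).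
import Mathlib
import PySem

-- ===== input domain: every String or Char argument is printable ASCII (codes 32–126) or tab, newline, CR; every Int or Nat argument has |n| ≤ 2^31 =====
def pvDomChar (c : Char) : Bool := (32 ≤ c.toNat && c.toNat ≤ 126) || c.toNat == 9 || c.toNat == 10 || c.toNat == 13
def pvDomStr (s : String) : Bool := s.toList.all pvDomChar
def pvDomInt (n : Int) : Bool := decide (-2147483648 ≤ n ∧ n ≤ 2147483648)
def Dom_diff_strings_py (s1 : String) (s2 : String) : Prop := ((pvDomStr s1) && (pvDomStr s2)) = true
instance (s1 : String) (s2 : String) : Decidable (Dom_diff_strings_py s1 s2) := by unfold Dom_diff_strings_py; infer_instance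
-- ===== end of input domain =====

-- B inverts A's strategy: instead of scanning for mismatches (A's comparison loop plus a
-- separate length-difference loop), B records the set of positions where the strings AGREE
-- and returns the complement of that set within range(max length); objective: alternative.

-- ===== PORT A =====
-- literal transliteration: first loop over range(min(len(s1), len(s2))) comparing
-- s1[i] != s2[i] (indices are always in range there, so comparing the pyGet? options is
-- exact), then, if the lengths differ, a loop over range(min, max) appending each index.
def diff_strings_py (s1 : String) (s2 : String) : List Int :=
  let l1 := s1.toList
  let l2 := s2.toList
  let diffs : List Int :=
    (PySem.List.pyRange 0 ((min l1.length l2.length : Nat) : Int) 1).foldl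
      (fun acc i =>
        if PySem.List.pyGet? l1 i ≠ PySem.List.pyGet? l2 i then acc ++ [i] else acc) []
  if l1.length ≠ l2.length then
    (PySem.List.pyRange ((min l1.length l2.length : Nat) : Int)
        ((max l1.length l2.length : Nat) : Int) 1).foldl
      (fun acc i => acc ++ [i]) diffs
  else diffs

-- ===== PORT B =====
-- transcription of Source B: the set comprehension {i for i,(a,b) in enumerate(zip(s1,s2)) if a==b}
-- is a fold with PySem.Set.add over enumerate(zip l1 l2), then the list comprehension filters
-- range(max(len,len)) by non-membership in that set (membership is order-safe on PySem.Set).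
def diff_strings_py_alt (s1 : String) (s2 : String) : List Int :=
  let l1 := s1.toList
  let l2 := s2.toList
  let same : PySem.Set Int :=
    (PySem.List.enumerate (l1.zip l2) 0).foldl
      (fun s p => if p.2.1 = p.2.2 then PySem.Set.add s p.1 else s) PySem.Set.empty
  (PySem.List.pyRange 0 ((max l1.length l2.length : Nat) : Int) 1).filter
    (fun i => !(PySem.Set.contains same i))

-- ===== PRECONDITION & SPEC =====
def Spec_diff_strings_py (s1 : String) (s2 : String) (out : List Int) : Prop := out = diff_strings_py_alt s1 s2
instance (s1 : String) (s2 : String) (out : List Int) : Decidable (Spec_diff_strings_py s1 s2 out) := by unfold Spec_diff_strings_py; infer_instance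

-- ===== CLAIM (what is proved, stated in full; the proofs are below) =====
def Claim_equal_diff_strings_py : Prop := ∀ (s1 : String) (s2 : String), Dom_diff_strings_py s1 s2 → Spec_diff_strings_py s1 s2 (diff_strings_py s1 s2)

-- ===== LEMMAS AND PROOFS =====

-- common normal form both ports are reduced to
def pvRef (l1 l2 : List Char) : List Int :=
  ((List.range (min l1.length l2.length)).filter
      (fun j => decide (l1[j]? ≠ l2[j]?))).map (fun j : Nat => (j : Int))
    ++ PySem.List.pyRange ((min l1.length l2.length : Nat) : Int)
        ((max l1.length l2.length : Nat) : Int) 1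

-- pyRange between two Nat endpoints, written as a map over List.range
lemma pvRange_nat_nat (d : Nat) : ∀ (a : Nat),
    PySem.List.pyRange (a : Int) ((a + d : Nat) : Int) 1
      = (List.range d).map (fun t : Nat => ((a + t : Nat) : Int)) := by
  induction d with
  | zero => intro a; simp [PySem.List.pyRange_one_eq_nil]
  | succ d ih =>
    intro a
    have h : PySem.List.pyRange (a : Int) ((a + (d + 1) : Nat) : Int) 1
        = (a : Int) :: PySem.List.pyRange ((a : Int) + 1) ((a + (d + 1) : Nat) : Int) 1 :=
      PySem.List.pyRange_one_cons (by push_cast; omega)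
    have h2 : ((a : Int) + 1) = ((a + 1 : Nat) : Int) := by push_cast; ring
    have h3 : ((a + (d + 1) : Nat) : Int) = (((a + 1) + d : Nat) : Int) := by push_cast; ring
    rw [h, h2, h3, ih (a + 1), List.range_succ_eq_map, List.map_cons, List.map_map]
    refine congrArg₂ List.cons (by simp) (List.map_congr_left ?_)
    intro x _
    simp only [Function.comp_apply]
    congr 1
    omega

-- the fold building B's 'same' set: over enumerate starting at k, with every element of the
-- accumulator below k, Set.add always appends, so the result is the accumulator followed by
-- the kept (index, pair) first components.
lemma pvSameFold (zs : List (Char × Char)) : ∀ (k : Int) (s : List Int), (∀ x ∈ s, x < k) →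
    (PySem.List.enumerate zs k).foldl
        (fun s p => if p.2.1 = p.2.2 then PySem.Set.add s p.1 else s) s
      = s ++ ((PySem.List.enumerate zs k).filter (fun p => p.2.1 == p.2.2)).map (·.1) := by
  induction zs with
  | nil => intro k s _; simp [PySem.List.enumerate_nil]
  | cons z zs ih =>
    intro k s hs
    rw [PySem.List.enumerate_cons]
    by_cases hz : z.1 = z.2
    · have hadd : PySem.Set.add s k = s ++ [k] := by
        unfold PySem.Set.add
        rw [if_neg]
        simp only [PySem.Set.contains_eq_listContains, List.contains_eq_mem,
          decide_eq_true_eq]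
        intro hmem
        exact absurd rfl (Int.ne_of_lt (hs k (by simpa using hmem)))
      have hlt : ∀ x ∈ s ++ [k], x < k + 1 := by
        intro x hx
        rcases List.mem_append.1 hx with h | h
        · exact lt_trans (hs x h) (by omega)
        · simp at h; omega
      simp only [List.foldl_cons, if_pos hz, hadd, ih (k + 1) (s ++ [k]) hlt,
        List.filter_cons, List.append_assoc]
      have : ((k, z).2.1 == (k, z).2.2) = true := by simpa using hz
      rw [this]
      simp
    · have hlt : ∀ x ∈ s, x < k + 1 := fun x hx => lt_trans (hs x hx) (by omega)
      simp only [List.foldl_cons, if_neg hz, ih (k + 1) s hlt, List.filter_cons]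
      have : ((k, z).2.1 == (k, z).2.2) = false := by simpa using hz
      rw [this]
      simp

-- B's 'same' set as an explicit list of the agreeing positions, cast to Int
lemma pvSame_eq (l1 l2 : List Char) :
    (PySem.List.enumerate (l1.zip l2) 0).foldl
        (fun s p => if p.2.1 = p.2.2 then PySem.Set.add s p.1 else s) PySem.Set.empty
      = ((List.range (min l1.length l2.length)).filter
            (fun j => l1[j]? == l2[j]?)).map (fun j : Nat => (j : Int)) := by
  rw [pvSameFold (l1.zip l2) 0 PySem.Set.empty (by intro x hx; cases hx)]
  have main : ∀ (l1 l2 : List Char) (k : Int),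
      ((PySem.List.enumerate (l1.zip l2) k).filter (fun p => p.2.1 == p.2.2)).map (·.1)
        = ((List.range (min l1.length l2.length)).filter
            (fun j => l1[j]? == l2[j]?)).map (fun j : Nat => k + (j : Int)) := by
    intro l1
    induction l1 with
    | nil => intro l2 k; simp [PySem.List.enumerate_nil]
    | cons a as ih =>
      intro l2 k
      cases l2 with
      | nil => simp [PySem.List.enumerate_nil]
      | cons b bs =>
        have hmin : min (a :: as).length (b :: bs).length = min as.length bs.length + 1 := by
          simp [Nat.succ_min_succ]
        have hmap : ∀ L : List Nat,
            (L.map Nat.succ).map (fun j : Nat => k + (j : Int))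
              = L.map (fun j : Nat => (k + 1) + (j : Int)) := by
          intro L
          rw [List.map_map]
          apply List.map_congr_left
          intro x _
          simp only [Function.comp_apply]
          push_cast
          ring
        have hc : (List.range (min as.length bs.length)).filter
              ((fun j => (a :: as)[j]? == (b :: bs)[j]?) ∘ Nat.succ)
            = (List.range (min as.length bs.length)).filter
                (fun j => as[j]? == bs[j]?) := by
          apply List.filter_congr
          intro j _
          simp [Function.comp]
        rw [hmin, List.range_succ_eq_map, List.filter_cons, List.filter_map,
          List.zip_cons_cons, PySem.List.enumerate_cons, List.filter_cons]
        by_cases hab : a = b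
        · have h1 : ((k, (a, b)).2.1 == (k, (a, b)).2.2) = true := by simpa using hab
          have h2 : ((a :: as)[0]? == (b :: bs)[0]?) = true := by simpa using hab
          rw [h1, h2, if_pos rfl, if_pos rfl]
          simp only [List.map_cons]
          rw [ih bs (k + 1)]
          simp only [Nat.cast_zero, add_zero]
          rw [hmap, hc]
        · have h1 : ((k, (a, b)).2.1 == (k, (a, b)).2.2) = false := by simpa using hab
          have h2 : ((a :: as)[0]? == (b :: bs)[0]?) = false := by simpa using hab
          rw [h1, h2]
          simp only [Bool.false_eq_true, if_false]
          rw [ih bs (k + 1), hmap, hc]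
  rw [main l1 l2 0]
  simp

theorem pvAlt_eq_ref (s1 s2 : String) :
    diff_strings_py_alt s1 s2 = pvRef s1.toList s2.toList := by
  simp only [diff_strings_py_alt, pvRef]
  rw [pvSame_eq, PySem.List.pyRange_zero_nat, List.filter_map]
  set l1 := s1.toList
  set l2 := s2.toList
  set n := min l1.length l2.length with hn
  set m := max l1.length l2.length with hm
  have hnm : n ≤ m := le_trans (Nat.min_le_left _ _) (Nat.le_max_left _ _)
  have hcontains : ∀ j : Nat,
      (PySem.Set.contains
          (((List.range n).filter (fun j => l1[j]? == l2[j]?)).map (fun j : Nat => (j : Int)))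
          ((j : Nat) : Int))
        = decide (j < n ∧ l1[j]? = l2[j]?) := by
    intro j
    simp only [PySem.Set.contains_eq_listContains, List.contains_eq_mem]
    by_cases hj : j < n ∧ l1[j]? = l2[j]?
    · rw [decide_eq_true hj]
      apply decide_eq_true
      exact List.mem_map_of_mem (List.mem_filter.2 ⟨List.mem_range.2 hj.1, by simp [hj.2]⟩)
    · rw [decide_eq_false hj]
      apply decide_eq_false
      intro hmem
      rcases List.mem_map.1 hmem with ⟨j', hj', hcast⟩
      have : j' = j := by exact_mod_cast hcast
      subst this
      rcases List.mem_filter.1 hj' with ⟨hr, heq⟩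
      exact hj ⟨List.mem_range.1 hr, by simpa using heq⟩
  have hsplit : List.range m = List.range n ++ (List.range (m - n)).map (n + ·) := by
    rw [← List.range_add, Nat.add_sub_cancel' hnm]
  rw [hsplit, List.filter_append, List.filter_map, List.map_append, List.map_map]
  congr 1
  · have : (List.range n).filter
          ((fun i => !(PySem.Set.contains
            (((List.range n).filter (fun j => l1[j]? == l2[j]?)).map (fun j : Nat => (j : Int))) i))
            ∘ (fun k : Nat => (k : Int)))
        = (List.range n).filter (fun j => decide (l1[j]? ≠ l2[j]?)) := by
      apply List.filter_congr
      intro j hj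
      have hjn : j < n := List.mem_range.1 hj
      simp only [Function.comp_apply, hcontains j]
      by_cases h : l1[j]? = l2[j]? <;> simp [h, hjn]
    rw [this]
  · have : (List.range (m - n)).filter
          (((fun i => !(PySem.Set.contains
            (((List.range n).filter (fun j => l1[j]? == l2[j]?)).map (fun j : Nat => (j : Int))) i))
            ∘ (fun k : Nat => (k : Int))) ∘ (n + ·))
        = List.range (m - n) := by
      apply List.filter_eq_self.2
      intro t _
      simp only [Function.comp_apply, hcontains (n + t)]
      simp [Nat.not_lt.2 (Nat.le_add_right n t)]
    rw [this]
    have hfun : ((fun k : Nat => (k : Int)) ∘ (fun x => n + x))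
        = (fun t : Nat => ((n + t : Nat) : Int)) := rfl
    rw [hfun, ← pvRange_nat_nat (m - n) n, Nat.add_sub_cancel' hnm]

theorem diff_strings_py_eq_ref (s1 s2 : String) :
    diff_strings_py s1 s2 = pvRef s1.toList s2.toList := by
  simp only [diff_strings_py, pvRef]
  rw [PySem.List.foldl_append_ite_eq_filter, List.nil_append,
      PySem.List.pyRange_zero_nat, List.filter_map]
  have hc2 : (List.range (min s1.toList.length s2.toList.length)).filter
        ((fun i => decide (PySem.List.pyGet? s1.toList i ≠ PySem.List.pyGet? s2.toList i))
          ∘ (fun k : Nat => (k : Int)))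
      = (List.range (min s1.toList.length s2.toList.length)).filter
          (fun j => decide (s1.toList[j]? ≠ s2.toList[j]?)) := by
    apply List.filter_congr
    intro j _
    simp [Function.comp]
  rw [hc2]
  by_cases hlen : s1.toList.length = s2.toList.length
  · rw [if_neg (by simp [hlen])]
    rw [PySem.List.pyRange_one_eq_nil (by simp [hlen]), List.append_nil]
  · rw [if_pos hlen, PySem.List.foldl_append_singleton]

-- ===== VERDICT (by name: the statement is the Claim_ definition above) =====
theorem diff_strings_py_spec : Claim_equal_diff_strings_py := by
  intro s1 s2 _
  unfold Spec_diff_strings_py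
  rw [diff_strings_py_eq_ref, pvAlt_eq_ref]
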